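-- pv_equiv track=rewrite | github.com/ablab/stringdecomposer | sd/scripts/build_centromere_evolution_tree.py | identify_isolates
-- ===== SOURCE A (Python) =====
-- def identify_isolates(item_id, alns, freq_map, distance):
--     isolates = [set() for _ in range(len(alns))]
--     div_pos = [set() for _ in range(len(alns))]
--     prehistoric_alns = [alns[i][:] for i in range(len(alns))]
--     new_freq_map = []
--     num_isolates = 0
--     for i in range(len(freq_map)):
--         new_freq_map.append(freq_map[i])
--         pos_lst = sorted([[c, freq_map[i][c]] for c in freq_map[i]], key=lambda x: -x[1])
--         for it in pos_lst[1:]: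
--             nuc, freq = it
--             left = [-100500 for _ in range(len(alns))]
--             nearest = -100500
--             for j in range(len(alns)):
--                 left[j] = nearest
--                 h = alns[j]
--                 if h[1][i] == nuc:
--                     nearest = j
--             right = [100500 for _ in range(len(alns))]
--             nearest = 100500
--             for j in range(len(alns)-1, -1, -1):
--                 right[j] = nearest
--                 h = alns[j]
--                 if h[1][i] == nuc:
--                     nearest = j
--             for j in range(len(alns)):
--                 h = alns[j]
--                 if (h[1][i] == nuc and j - left[j] > distance and right[j] - j > distance):
--                     num_isolates += 1
--                     isolates[j].add(str(i) + "_" + str(nuc))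
--                     prehistoric_alns[j][1] = prehistoric_alns[j][1][:i] + pos_lst[0][0] + prehistoric_alns[j][1][i+1:]
--                     new_freq_map[i][pos_lst[0][0]] += 1
--                     new_freq_map[i][nuc] -= 1
--
--     #print_isolates(item_id.replace("/","_"), isolates, num_isolates)
--     return prehistoric_alns, new_freq_map, isolates
-- ===== SOURCE B (Python) =====
-- def identify_isolates(item_id, alns, freq_map, distance):
--     # Two phases: detect all isolate events first (reading only alns), then apply
--     # them. Like the original, mutates the dict objects held by freq_map (the
--     # original's returned new_freq_map aliases them); never mutates alns.
--     n = len(alns)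
--     # Phase 1: detection. Every event is (position, minority nuc, majority nuc, row).
--     events = []
--     for i, fm in enumerate(freq_map):
--         ranked = sorted(fm.items(), key=lambda kv: -kv[1])
--         for nuc, _ in ranked[1:]:
--             occ = [j for j in range(n) if alns[j][1][i] == nuc]
--             for prev, j, nxt in zip([-100500] + occ, occ, occ[1:] + [100500]):
--                 if j - prev > distance and nxt - j > distance:
--                     events.append((i, nuc, ranked[0][0], j))
--     # Phase 2: apply the recorded events.
--     isolates = [set() for _ in range(n)]
--     prehistoric = [row[:] for row in alns]
--     for i, nuc, major, j in events:
--         isolates[j].add(str(i) + "_" + nuc)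
--         s = prehistoric[j][1]
--         prehistoric[j][1] = s[:i] + major + s[i + 1:]
--         freq_map[i][major] += 1
--         freq_map[i][nuc] -= 1
--     return prehistoric, freq_map, isolates
-- ===== Notes on version B (the rewrite author's own statement) =====
-- stated objective: alternative
-- what changed: B splits the function into two phases: a pure detection pass that collects the complete list of isolate events (per position/minority nucleotide it builds the ascending occurrence list and keeps rows whose gaps to the previous/next occurrence, with the -100500/100500 end sentinels, exceed distance), and a separate application pass that folds the recorded events over the state - instead of A's interleaved three full passes building left/right nearest-occurrence arrays and updating in place per nucleotide.
import Mathlib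
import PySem

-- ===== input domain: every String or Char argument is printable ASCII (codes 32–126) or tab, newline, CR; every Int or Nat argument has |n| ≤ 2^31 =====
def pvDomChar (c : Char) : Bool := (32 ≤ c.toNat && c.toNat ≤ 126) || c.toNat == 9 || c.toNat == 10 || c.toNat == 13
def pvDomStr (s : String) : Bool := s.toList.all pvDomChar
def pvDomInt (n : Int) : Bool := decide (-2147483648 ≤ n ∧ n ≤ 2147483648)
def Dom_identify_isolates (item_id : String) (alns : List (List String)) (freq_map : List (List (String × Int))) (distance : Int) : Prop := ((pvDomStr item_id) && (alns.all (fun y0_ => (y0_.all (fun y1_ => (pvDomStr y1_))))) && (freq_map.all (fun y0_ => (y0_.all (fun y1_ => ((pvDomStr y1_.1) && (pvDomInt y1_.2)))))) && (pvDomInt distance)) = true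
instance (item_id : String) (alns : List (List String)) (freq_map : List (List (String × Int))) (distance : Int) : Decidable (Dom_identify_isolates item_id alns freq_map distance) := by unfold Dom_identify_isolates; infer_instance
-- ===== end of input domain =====

-- B detects first and applies second: it computes the full list of isolate events in a
-- pure detection phase (occurrence lists per position/minority nucleotide, gap test with
-- the ±100500 end sentinels), then applies them in one fold — instead of A's interleaved
-- three-pass left/right nearest-occurrence arrays and in-place updates per nucleotide.
-- Return values proved equal. Like A, the Python B mutates the dict objects held by
-- freq_map in place (A's returned new_freq_map aliases them); neither mutates alns.


-- ===== PORT A =====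
-- A's expression `alns[j][1][i]` (one-character string)
def pvNucAt (alns : List (List String)) (i j : Int) : String :=
  ((PySem.Str.pyGet? (PySem.List.pyGetD (PySem.List.pyGetD alns j []) 1 "") i).map
    (fun c => String.ofList [c])).getD ""

-- A's update block for an isolated row j (num += 1; isolates[j].add; splice
-- prehistoric[j][1] at column i with the majority nucleotide; dict += / -=);
-- state = (num_isolates, isolates, prehistoric_alns, current position's dict)
def pvIsoUpdate (i : Int) (nuc major : String)
    (st : Int × List (List String) × List (List String) × PySem.Dict String Int) (j : Int) :
    Int × List (List String) × List (List String) × PySem.Dict String Int :=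
  let iso' := PySem.List.pySetD st.2.1 j
      (PySem.Set.add (PySem.List.pyGetD st.2.1 j []) (PySem.Int.toStr i ++ "_" ++ nuc))
  let row := PySem.List.pyGetD st.2.2.1 j []
  let s := PySem.List.pyGetD row 1 ""
  let s' := PySem.Str.slice s none (some i) ++ major ++ PySem.Str.slice s (some (i + 1)) none
  let pre' := PySem.List.pySetD st.2.2.1 j (PySem.List.pySetD row 1 s')
  let d' := (st.2.2.2.modify major 0 (· + 1)).modify nuc 0 (· - 1)
  (st.1 + 1, iso', pre', d')

-- A's `left[j] = nearest; if alns[j][1][i] == nuc: nearest = j` loop body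
def pvScanStep (p : Int → Bool) (ac : List Int × Int) (j : Int) : List Int × Int :=
  (PySem.List.pySetD ac.1 j ac.2, if p j then j else ac.2)

-- A's per-minority-nucleotide block: build left[]/right[] in two passes, then the
-- detection/update pass over all rows
def pvNucStepA (alns : List (List String)) (distance : Int) (i : Int)
    (pos_lst : List (String × Int))
    (st : Int × List (List String) × List (List String) × PySem.Dict String Int)
    (it : String × Int) :
    Int × List (List String) × List (List String) × PySem.Dict String Int :=
  let n := alns.length
  let nuc := it.1
  let left := ((PySem.List.pyRange 0 (n : Int) 1).foldl
      (pvScanStep (fun j => pvNucAt alns i j == nuc))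
      (List.replicate n (-100500), -100500)).1
  let right := ((PySem.List.pyRange ((n : Int) - 1) (-1) (-1)).foldl
      (pvScanStep (fun j => pvNucAt alns i j == nuc))
      (List.replicate n 100500, 100500)).1
  (PySem.List.pyRange 0 (n : Int) 1).foldl (fun st2 j =>
      if pvNucAt alns i j == nuc
          && decide (j - PySem.List.pyGetD left j 0 > distance)
          && decide (PySem.List.pyGetD right j 0 - j > distance)
      then pvIsoUpdate i nuc (PySem.List.pyGetD pos_lst 0 ("", 0)).1 st2 j
      else st2) st

-- A's body for one position i of freq_map; acc = (prehistoric, new_freq_map, isolates, num)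
def pvPosStepA (alns : List (List String)) (freq_map : List (List (String × Int)))
    (distance : Int)
    (acc : List (List String) × List (List (String × Int)) × List (List String) × Int)
    (i : Int) :
    List (List String) × List (List (String × Int)) × List (List String) × Int :=
  let d := PySem.Dict.ofList (PySem.List.pyGetD freq_map i [])
  let pos_lst := PySem.List.sorted d.items (fun x => -x.2) false
  let inner := (PySem.List.slice pos_lst (some 1) none).foldl
      (pvNucStepA alns distance i pos_lst) (acc.2.2.2, acc.2.2.1, acc.1, d)
  (inner.2.2.1, acc.2.1 ++ [inner.2.2.2.items], inner.2.1, inner.1)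

def identify_isolates (item_id : String) (alns : List (List String))
    (freq_map : List (List (String × Int))) (distance : Int) :
    List (List String) × (List (List (String × Int))) × List (List String) :=
  let res := (PySem.List.pyRange 0 (freq_map.length : Int) 1).foldl
    (pvPosStepA alns freq_map distance)
    (alns.map (fun h => PySem.List.slice h none none),
     ([] : List (List (String × Int))), List.replicate alns.length ([] : List String),
     (0 : Int))
  (res.1, res.2.1, res.2.2.1)

-- ===== PORT B =====
-- phase 1, innermost: the events for one position i and one minority nucleotide — the
-- occurrence list `occ` and the comprehension-style walk of zip([-100500]+occ, occ,
-- occ[1:]+[100500]) keeping the rows whose both gaps exceed distance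
def pvEvOne (alns : List (List String)) (distance : Int) (i : Int) (nuc major : String) :
    List (Int × String × String × Int) :=
  let occ := (PySem.List.pyRange 0 (alns.length : Int) 1).filter (fun j =>
    ((PySem.Str.pyGet? (PySem.List.pyGetD (PySem.List.pyGetD alns j []) 1 "") i).map
      (fun c => String.ofList [c])).getD "" == nuc)
  (((-100500 : Int) :: occ).zip
      (occ.zip (PySem.List.slice occ (some 1) none ++ [(100500 : Int)]))).filterMap
    (fun t => if t.2.1 - t.1 > distance ∧ t.2.2 - t.2.1 > distance
      then some (i, nuc, major, t.2.1) else none)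

-- phase 1, one (i, fm) pair of enumerate(freq_map): rank the dict entries, collect the
-- events of every minority nucleotide
def pvEvPos (alns : List (List String)) (distance : Int)
    (ifm : Int × List (String × Int)) : List (Int × String × String × Int) :=
  let ranked := PySem.List.sorted (PySem.Dict.ofList ifm.2).items (fun kv => -kv.2) false
  (PySem.List.slice ranked (some 1) none).flatMap (fun it =>
    pvEvOne alns distance ifm.1 it.1 (PySem.List.pyGetD ranked 0 ("", 0)).1)

-- phase 2: apply one recorded event e = (i, nuc, major, j) to
-- (prehistoric, freq dicts, isolates)
def pvApplyEv
    (st : List (List String) × List (PySem.Dict String Int) × List (List String))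
    (e : Int × String × String × Int) :
    List (List String) × List (PySem.Dict String Int) × List (List String) :=
  let iso' := PySem.List.pySetD st.2.2 e.2.2.2
      (PySem.Set.add (PySem.List.pyGetD st.2.2 e.2.2.2 [])
        (PySem.Int.toStr e.1 ++ "_" ++ e.2.1))
  let row := PySem.List.pyGetD st.1 e.2.2.2 []
  let s := PySem.List.pyGetD row 1 ""
  let pre' := PySem.List.pySetD st.1 e.2.2.2 (PySem.List.pySetD row 1
      (PySem.Str.slice s none (some e.1) ++ e.2.2.1
        ++ PySem.Str.slice s (some (e.1 + 1)) none))
  let d := PySem.List.pyGetD st.2.1 e.1 (PySem.Dict.ofList [])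
  (pre', PySem.List.pySetD st.2.1 e.1 ((d.modify e.2.2.1 0 (· + 1)).modify e.2.1 0 (· - 1)),
   iso')

def identify_isolates_alt (item_id : String) (alns : List (List String))
    (freq_map : List (List (String × Int))) (distance : Int) :
    List (List String) × (List (List (String × Int))) × List (List String) :=
  let events := (PySem.List.enumerate freq_map).flatMap (pvEvPos alns distance)
  let fin := events.foldl pvApplyEv
    (alns, freq_map.map PySem.Dict.ofList, List.replicate alns.length ([] : List String))
  (fin.1, fin.2.1.map (fun d => d.items), fin.2.2)

-- ===== PRECONDITION & SPEC =====
-- Pre_ excludes exactly the inputs where the Python A raises an IndexError: whenever some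
-- position i has at least two distinct keys in its frequency dict, every alignment row
-- must have a second field long enough to be indexed at i. (The Python B raises on the
-- same inputs; the two total ports are faithful inside Pre_.)
def Pre_identify_isolates (item_id : String) (alns : List (List String))
    (freq_map : List (List (String × Int))) (distance : Int) : Prop :=
  ∀ i < freq_map.length, 2 ≤ ((freq_map.getD i []).map Prod.fst).dedup.length →
    ∀ h ∈ alns, 2 ≤ h.length ∧ i < (h.getD 1 "").length
instance (item_id : String) (alns : List (List String)) (freq_map : List (List (String × Int))) (distance : Int) : Decidable (Pre_identify_isolates item_id alns freq_map distance) := by unfold Pre_identify_isolates; infer_instance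

def pvWitness_identify_isolates : String × List (List String) × (List (List (String × Int))) × Int :=
  ("id", [["n", "ACG"], ["n", "AAG"], ["n", "ACG"]],
   [[("A", 3)], [("C", 2), ("A", 1)], [("G", 3)]], 0)

def Spec_identify_isolates (item_id : String) (alns : List (List String)) (freq_map : List (List (String × Int))) (distance : Int) (out : List (List String) × (List (List (String × Int))) × List (List String)) : Prop := out = identify_isolates_alt item_id alns freq_map distance
instance (item_id : String) (alns : List (List String)) (freq_map : List (List (String × Int))) (distance : Int) (out : List (List String) × (List (List (String × Int))) × List (List String)) : Decidable (Spec_identify_isolates item_id alns freq_map distance out) := by unfold Spec_identify_isolates; infer_instance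

-- ===== CLAIM (what is proved, stated in full; the proofs are below) =====
def Claim_equal_identify_isolates : Prop := ∀ (item_id : String) (alns : List (List String)) (freq_map : List (List (String × Int))) (distance : Int), Dom_identify_isolates item_id alns freq_map distance → Pre_identify_isolates item_id alns freq_map distance → Spec_identify_isolates item_id alns freq_map distance (identify_isolates item_id alns freq_map distance)

-- ===== LEMMAS AND PROOFS =====
-- nearest occurrence of the minority nucleotide strictly BEFORE m (sentinel -100500)
def pvPrev (p : Int → Bool) (m : Int) : Int :=
  (((PySem.List.pyRange 0 m 1).filter p).getLast?).getD (-100500)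

-- first occurrence at or after m and below n (sentinel 100500)
def pvNext (p : Int → Bool) (n m : Int) : Int :=
  (((PySem.List.pyRange m n 1).filter p).head?).getD 100500

-- the rows that A's guard accepts for one (position, minority nucleotide)
def pvRows (p : Int → Bool) (n : Nat) (dst : Int) : List Int :=
  ((PySem.List.pyRange 0 (n : Int) 1).filter p).filter
    (fun j => decide (j - pvPrev p j > dst) && decide (pvNext p n (j + 1) - j > dst))

theorem pvPrev_zero (p : Int → Bool) : pvPrev p 0 = -100500 := by
  simp [pvPrev, PySem.List.pyRange_one_eq_nil le_rfl]

theorem pvPrev_succ (p : Int → Bool) (m : Int) (h : 0 ≤ m) :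
    pvPrev p (m + 1) = if p m then m else pvPrev p m := by
  rw [pvPrev, PySem.List.pyRange_one_succ_right h, List.filter_append]
  cases hp : p m <;> simp [hp, pvPrev]

theorem pvNext_unfold (p : Int → Bool) (n m : Int) (h : m < n) :
    pvNext p n m = if p m then m else pvNext p n (m + 1) := by
  rw [pvNext, PySem.List.pyRange_one_cons h]
  cases hp : p m <;> simp [List.filter_cons, hp, pvNext]

theorem pvNext_of_ge (p : Int → Bool) (n m : Int) (h : n ≤ m) : pvNext p n m = 100500 := by
  simp [pvNext, PySem.List.pyRange_one_eq_nil h]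

theorem pvScan_left (p : Int → Bool) (n : Nat) :
    ∀ (cnt m : Nat), m + cnt = n → ∀ (arr : List Int), arr.length = n →
      (((PySem.List.pyRange (m : Int) (n : Int) 1).foldl (pvScanStep p)
          (arr, pvPrev p m)).1.length = n) ∧
      ∀ k : Nat, k < n →
        PySem.List.pyGetD (((PySem.List.pyRange (m : Int) (n : Int) 1).foldl (pvScanStep p)
            (arr, pvPrev p m)).1) (k : Int) 0
        = if m ≤ k then pvPrev p (k : Int) else PySem.List.pyGetD arr (k : Int) 0 := by
  intro cnt
  induction cnt with
  | zero =>
    intro m hm arr hlen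
    have : (m : Int) = (n : Int) := by omega
    rw [this, PySem.List.pyRange_one_eq_nil le_rfl]
    simp only [List.foldl_nil]
    refine ⟨hlen, ?_⟩
    intro k hk
    have : ¬ m ≤ k := by omega
    simp [this]
  | succ c ih =>
    intro m hm arr hlen
    have hmn : (m : Int) < (n : Int) := by omega
    rw [PySem.List.pyRange_one_cons hmn]
    simp only [List.foldl_cons]
    have hstep : pvScanStep p (arr, pvPrev p m) (m : Int)
        = (PySem.List.pySetD arr (m : Int) (pvPrev p m), pvPrev p ((m : Int) + 1)) := by
      rw [pvPrev_succ p (m : Int) (by omega)]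
      simp [pvScanStep]
    rw [hstep]
    have hcast : (m : Int) + 1 = ((m + 1 : Nat) : Int) := by push_cast; ring
    have hlen' : (PySem.List.pySetD arr (m : Int) (pvPrev p m)).length = n := by
      rw [PySem.List.pySetD_natCast]; simp [hlen]
    have hih := ih (m + 1) (by omega) (PySem.List.pySetD arr (m : Int) (pvPrev p m)) hlen'
    rw [hcast]
    refine ⟨hih.1, ?_⟩
    intro k hk
    rw [hih.2 k hk]
    have hget := PySem.List.pyGetD_pySetD_natCast arr m k (pvPrev p (m : Int)) 0 (by omega)
    by_cases h1 : m + 1 ≤ k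
    · have h2 : m ≤ k := by omega
      simp [h1, h2]
    · rw [if_neg h1, hget]
      by_cases h3 : k = m
      · subst h3
        simp
      · have h5 : ¬ m ≤ k := by omega
        simp [h3, h5]

theorem pvScan_right (p : Int → Bool) (n : Nat) :
    ∀ (cnt : Nat) (a : Int), a + 1 = cnt → a ≤ (n : Int) - 1 → ∀ (arr : List Int), arr.length = n →
      (((PySem.List.pyRange a (-1) (-1)).foldl (pvScanStep p)
          (arr, pvNext p n (a + 1))).1.length = n) ∧
      ∀ k : Nat, k < n →
        PySem.List.pyGetD (((PySem.List.pyRange a (-1) (-1)).foldl (pvScanStep p)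
            (arr, pvNext p n (a + 1))).1) (k : Int) 0
        = if (k : Int) ≤ a then pvNext p n ((k : Int) + 1) else PySem.List.pyGetD arr (k : Int) 0 := by
  intro cnt
  induction cnt with
  | zero =>
    intro a ha han arr hlen
    have : a = -1 := by omega
    subst this
    rw [PySem.List.pyRange_neg_one_eq_nil le_rfl]
    simp only [List.foldl_nil]
    refine ⟨hlen, ?_⟩
    intro k hk
    have : ¬ (k : Int) ≤ -1 := by omega
    simp [this]
  | succ c ih =>
    intro a ha han arr hlen
    obtain ⟨an, rfl⟩ : ∃ an : Nat, a = (an : Int) := ⟨a.toNat, by omega⟩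
    rw [PySem.List.pyRange_neg_one_cons (by omega : (-1 : Int) < (an : Int))]
    simp only [List.foldl_cons]
    have hstep : pvScanStep p (arr, pvNext p n ((an : Int) + 1)) (an : Int)
        = (PySem.List.pySetD arr (an : Int) (pvNext p n ((an : Int) + 1)),
           pvNext p n (((an : Int) - 1) + 1)) := by
      have h0 : ((an : Int) - 1) + 1 = (an : Int) := by ring
      rw [h0, pvNext_unfold p n (an : Int) (by omega)]
      simp [pvScanStep]
    rw [hstep]
    have hlen' : (PySem.List.pySetD arr (an : Int) (pvNext p n ((an : Int) + 1))).length = n := by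
      rw [PySem.List.pySetD_natCast]; simp [hlen]
    have hih := ih ((an : Int) - 1) (by omega) (by omega) _ hlen'
    refine ⟨hih.1, ?_⟩
    intro k hk
    rw [hih.2 k hk]
    have hget := PySem.List.pyGetD_pySetD_natCast arr an k (pvNext p n ((an : Int) + 1)) 0 (by omega)
    by_cases h1 : (k : Int) ≤ (an : Int) - 1
    · have h2 : (k : Int) ≤ (an : Int) := by omega
      simp [h1, h2]
    · rw [if_neg h1, hget]
      by_cases h3 : k = an
      · subst h3
        simp
      · have h5 : ¬ (k : Int) ≤ (an : Int) := by omega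
        simp [h3, h5]

theorem pvFoldl_guard_filter {σ : Type} (p c : Int → Bool) (u : σ → Int → σ) :
    ∀ (l : List Int) (s : σ),
      l.foldl (fun st j => if p j && c j then u st j else st) s
      = (l.filter p).foldl (fun st j => if c j then u st j else st) s := by
  intro l
  induction l with
  | nil => intro s; simp
  | cons x t iht =>
    intro s
    rw [List.filter_cons, List.foldl_cons]
    cases hp : p x
    · simp only [Bool.false_and, Bool.false_eq_true, reduceIte]
      exact iht s
    · simp only [Bool.true_and, reduceIte, List.foldl_cons]
      exact iht _

-- A's guarded three-array pass equals a plain fold of the update over pvRows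
theorem pvMainA {σ : Type} (p : Int → Bool) (n : Nat) (dst : Int) (u : σ → Int → σ) (s : σ) :
    (PySem.List.pyRange 0 (n : Int) 1).foldl (fun st j =>
        if p j
            && decide (j - PySem.List.pyGetD (((PySem.List.pyRange 0 (n : Int) 1).foldl
                (pvScanStep p) (List.replicate n (-100500), -100500)).1) j 0 > dst)
            && decide (PySem.List.pyGetD (((PySem.List.pyRange ((n : Int) - 1) (-1) (-1)).foldl
                (pvScanStep p) (List.replicate n 100500, 100500)).1) j 0 - j > dst)
        then u st j else st) s
    = (pvRows p n dst).foldl u s := by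
  have hL := pvScan_left p n n 0 (by omega) (List.replicate n (-100500)) (by simp)
  simp only [Nat.cast_zero, pvPrev_zero] at hL
  have hR := pvScan_right p n n ((n : Int) - 1) (by omega) (by omega)
      (List.replicate n 100500) (by simp)
  have hnn : ((n : Int) - 1) + 1 = (n : Int) := by ring
  rw [hnn, pvNext_of_ge p n (n : Int) le_rfl] at hR
  have hcongr : (PySem.List.pyRange 0 (n : Int) 1).foldl (fun st j =>
        if p j
            && decide (j - PySem.List.pyGetD (((PySem.List.pyRange 0 (n : Int) 1).foldl
                (pvScanStep p) (List.replicate n (-100500), -100500)).1) j 0 > dst)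
            && decide (PySem.List.pyGetD (((PySem.List.pyRange ((n : Int) - 1) (-1) (-1)).foldl
                (pvScanStep p) (List.replicate n 100500, 100500)).1) j 0 - j > dst)
        then u st j else st) s
      = (PySem.List.pyRange 0 (n : Int) 1).foldl (fun st j =>
        if p j && (decide (j - pvPrev p j > dst) && decide (pvNext p n (j + 1) - j > dst))
        then u st j else st) s := by
    apply PySem.List.foldl_congr_mem
    intro acc j hj
    rw [PySem.List.mem_pyRange_one] at hj
    have hkn : j.toNat < n := by omega
    have hk : j = ((j.toNat : Nat) : Int) := by omega
    rw [hk, hL.2 j.toNat hkn, hR.2 j.toNat hkn,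
      if_pos (Nat.zero_le j.toNat), if_pos (by omega : ((j.toNat : Nat) : Int) ≤ (n : Int) - 1),
      Bool.and_assoc]
  rw [hcongr, pvFoldl_guard_filter p
      (fun j => decide (j - pvPrev p j > dst) && decide (pvNext p n (j + 1) - j > dst)) u,
    PySem.List.foldl_if_eq_foldl_filter]
  rfl

-- A's per-nucleotide step is a fold of pvIsoUpdate over the accepted rows
theorem pvNucStepA_rows (alns : List (List String)) (distance : Int) (i : Int)
    (pos_lst : List (String × Int))
    (st : Int × List (List String) × List (List String) × PySem.Dict String Int)
    (it : String × Int) :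
    pvNucStepA alns distance i pos_lst st it
    = (pvRows (fun j => pvNucAt alns i j == it.1) alns.length distance).foldl
        (pvIsoUpdate i it.1 (PySem.List.pyGetD pos_lst 0 ("", 0)).1) st := by
  unfold pvNucStepA
  exact pvMainA (fun j => pvNucAt alns i j == it.1) alns.length distance
    (pvIsoUpdate i it.1 (PySem.List.pyGetD pos_lst 0 ("", 0)).1) st

-- B's zip-of-three comprehension produces exactly the accepted rows, tagged
theorem pvEvTriple {α : Type} (p : Int → Bool) (n : Nat) (dst : Int) (g : Int → α) :
    ∀ (cnt m : Nat), m + cnt = n →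
      ((pvPrev p (m : Int) :: ((PySem.List.pyRange (m : Int) (n : Int) 1).filter p)).zip
          (((PySem.List.pyRange (m : Int) (n : Int) 1).filter p).zip
            (PySem.List.slice ((PySem.List.pyRange (m : Int) (n : Int) 1).filter p)
              (some 1) none ++ [(100500 : Int)]))).filterMap
        (fun t => if t.2.1 - t.1 > dst ∧ t.2.2 - t.2.1 > dst then some (g t.2.1) else none)
      = (((PySem.List.pyRange (m : Int) (n : Int) 1).filter p).filter
          (fun j => decide (j - pvPrev p j > dst)
            && decide (pvNext p n (j + 1) - j > dst))).map g := by
  intro cnt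
  induction cnt with
  | zero =>
    intro m hm
    have : (m : Int) = (n : Int) := by omega
    rw [this, PySem.List.pyRange_one_eq_nil le_rfl]
    simp
  | succ c ih =>
    intro m hm
    have hmn : (m : Int) < (n : Int) := by omega
    have hcast : ((m + 1 : Nat) : Int) = (m : Int) + 1 := by push_cast; ring
    have hrec0 := ih (m + 1) (by omega)
    rw [hcast] at hrec0
    rw [PySem.List.pyRange_one_cons hmn, List.filter_cons]
    cases hp : p (m : Int)
    · simp only [Bool.false_eq_true, reduceIte]
      have hprev : pvPrev p ((m : Int) + 1) = pvPrev p (m : Int) := by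
        rw [pvPrev_succ p (m : Int) (by omega), hp]; simp
      rw [← hprev]
      exact hrec0
    · simp only [reduceIte]
      rw [PySem.List.slice_from_one, List.tail_cons]
      have hprevm1 : pvPrev p ((m : Int) + 1) = (m : Int) := by
        rw [pvPrev_succ p (m : Int) (by omega), hp]; simp
      cases hoc : (PySem.List.pyRange ((m : Int) + 1) (n : Int) 1).filter p with
      | nil =>
        have hnx : pvNext p n ((m : Int) + 1) = 100500 := by
          rw [pvNext, hoc]; simp
        simp only [hoc, List.nil_append, List.zip_cons_cons, List.zip_nil_right,
          List.filterMap_cons, List.filterMap_nil, List.filter_cons, List.filter_nil,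
          List.map_nil]
        by_cases hc : ((m : Int) - pvPrev p (m : Int) > dst ∧ (100500 : Int) - (m : Int) > dst)
        · rw [if_pos hc, if_pos (by rw [hnx]; simpa using hc)]
          simp
        · rw [if_neg hc, if_neg (by rw [hnx]; simpa using hc)]
          simp
      | cons x t =>
        have hnx : pvNext p n ((m : Int) + 1) = x := by
          rw [pvNext, hoc]; simp
        have htailzip :
            ((pvPrev p ((m : Int) + 1) :: (x :: t)).zip
              ((x :: t).zip (PySem.List.slice (x :: t) (some 1) none ++ [(100500 : Int)]))).filterMap
              (fun t => if t.2.1 - t.1 > dst ∧ t.2.2 - t.2.1 > dst then some (g t.2.1) else none)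
            = ((x :: t).filter (fun j => decide (j - pvPrev p j > dst)
                && decide (pvNext p n (j + 1) - j > dst))).map g := by
          rw [← hoc]; exact hrec0
        rw [PySem.List.slice_from_one, List.tail_cons, hprevm1] at htailzip
        simp only [hoc, List.cons_append, List.zip_cons_cons]
        rw [List.filter_cons, hnx]
        by_cases hc : ((m : Int) - pvPrev p (m : Int) > dst ∧ x - (m : Int) > dst)
        · rw [List.filterMap_cons_some (b := g (m : Int)) (by simp [hc.1, hc.2]),
            if_pos (by simp [hc.1, hc.2] :
              (decide ((m : Int) - pvPrev p (m : Int) > dst) && decide (x - (m : Int) > dst)) = true)]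
          simp only [List.map_cons, List.cons.injEq, true_and]
          exact htailzip
        · rw [List.filterMap_cons_none (by simp only [ite_eq_right_iff] ; intro h; exact absurd h hc),
            if_neg (by simpa using hc)]
          exact htailzip

theorem pvEvOne_eq_map (alns : List (List String)) (distance : Int) (i : Int)
    (nuc major : String) :
    pvEvOne alns distance i nuc major
    = (pvRows (fun j => pvNucAt alns i j == nuc) alns.length distance).map
        (fun j => (i, nuc, major, j)) := by
  have h := pvEvTriple (fun j => pvNucAt alns i j == nuc) alns.length distance
    (fun j => (i, nuc, major, j)) alns.length 0 (by omega)
  simp only [Nat.cast_zero, pvPrev_zero] at h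
  unfold pvEvOne pvRows pvNucAt
  exact h

-- applying B's tagged events = A's pvIsoUpdate fold, with the dict re-seated at index i
theorem pvApplyEv_rows (i : Nat) (nuc major : String) :
    ∀ (rows : List Int) (num : Int) (iso pre : List (List String))
      (L : List (PySem.Dict String Int)), i < L.length →
      (rows.map (fun j => ((i : Int), nuc, major, j))).foldl pvApplyEv (pre, L, iso)
      = ((rows.foldl (pvIsoUpdate (i : Int) nuc major)
            (num, iso, pre, PySem.List.pyGetD L (i : Int) (PySem.Dict.ofList []))).2.2.1,
         PySem.List.pySetD L (i : Int)
           (rows.foldl (pvIsoUpdate (i : Int) nuc major)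
            (num, iso, pre, PySem.List.pyGetD L (i : Int) (PySem.Dict.ofList []))).2.2.2,
         (rows.foldl (pvIsoUpdate (i : Int) nuc major)
            (num, iso, pre, PySem.List.pyGetD L (i : Int) (PySem.Dict.ofList []))).2.1) := by
  intro rows
  induction rows with
  | nil =>
    intro num iso pre L hiL
    simp only [List.map_nil, List.foldl_nil]
    rw [PySem.List.pySetD_natCast, PySem.List.pyGetD_natCast,
      List.getD_eq_getElem L _ hiL, List.set_getElem_self]
  | cons j t iht =>
    intro num iso pre L hiL
    simp only [List.map_cons, List.foldl_cons]
    set q := pvIsoUpdate (i : Int) nuc major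
      (num, iso, pre, PySem.List.pyGetD L (i : Int) (PySem.Dict.ofList [])) j with hq
    have hstep : pvApplyEv (pre, L, iso) ((i : Int), nuc, major, j)
        = (q.2.2.1, PySem.List.pySetD L (i : Int) q.2.2.2, q.2.1) := by
      simp only [pvApplyEv, pvIsoUpdate, hq]
    rw [hstep]
    have hiL' : i < (PySem.List.pySetD L (i : Int) q.2.2.2).length := by
      rw [PySem.List.pySetD_natCast]; simpa using hiL
    rw [iht q.1 q.2.1 q.2.2.1 _ hiL']
    have hgetset : PySem.List.pyGetD (PySem.List.pySetD L (i : Int) q.2.2.2) (i : Int)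
        (PySem.Dict.ofList []) = q.2.2.2 := by
      rw [PySem.List.pyGetD_pySetD_natCast _ _ _ _ _ hiL]
      simp
    rw [hgetset, hq]
    have hsetset : ∀ v : PySem.Dict String Int,
        PySem.List.pySetD (PySem.List.pySetD L (i : Int) q.2.2.2) (i : Int) v
        = PySem.List.pySetD L (i : Int) v := by
      intro v
      rw [PySem.List.pySetD_natCast, PySem.List.pySetD_natCast, PySem.List.pySetD_natCast,
        List.set_set]
    rw [hsetset]

-- the whole per-position inner loop, A-shape vs B-shape
theorem pvNucs_corr (alns : List (List String)) (distance : Int) (i : Nat)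
    (pos_lst : List (String × Int)) :
    ∀ (its : List (String × Int)) (num : Int) (iso pre : List (List String))
      (L : List (PySem.Dict String Int)), i < L.length →
      its.foldl (fun s it =>
          (pvEvOne alns distance (i : Int) it.1 (PySem.List.pyGetD pos_lst 0 ("", 0)).1).foldl
            pvApplyEv s) (pre, L, iso)
      = ((its.foldl (pvNucStepA alns distance (i : Int) pos_lst)
            (num, iso, pre, PySem.List.pyGetD L (i : Int) (PySem.Dict.ofList []))).2.2.1,
         PySem.List.pySetD L (i : Int)
           (its.foldl (pvNucStepA alns distance (i : Int) pos_lst)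
            (num, iso, pre, PySem.List.pyGetD L (i : Int) (PySem.Dict.ofList []))).2.2.2,
         (its.foldl (pvNucStepA alns distance (i : Int) pos_lst)
            (num, iso, pre, PySem.List.pyGetD L (i : Int) (PySem.Dict.ofList []))).2.1) := by
  intro its
  induction its with
  | nil =>
    intro num iso pre L hiL
    simp only [List.foldl_nil]
    rw [PySem.List.pySetD_natCast, PySem.List.pyGetD_natCast,
      List.getD_eq_getElem L _ hiL, List.set_getElem_self]
  | cons it t iht =>
    intro num iso pre L hiL
    simp only [List.foldl_cons]
    rw [pvEvOne_eq_map,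
      pvApplyEv_rows i it.1 (PySem.List.pyGetD pos_lst 0 ("", 0)).1 _ num iso pre L hiL]
    set q := (pvRows (fun j => pvNucAt alns (i : Int) j == it.1) alns.length distance).foldl
      (pvIsoUpdate (i : Int) it.1 (PySem.List.pyGetD pos_lst 0 ("", 0)).1)
      (num, iso, pre, PySem.List.pyGetD L (i : Int) (PySem.Dict.ofList [])) with hq
    have hiL' : i < (PySem.List.pySetD L (i : Int) q.2.2.2).length := by
      rw [PySem.List.pySetD_natCast]; simpa using hiL
    rw [iht q.1 q.2.1 q.2.2.1 _ hiL']
    have hgetset : PySem.List.pyGetD (PySem.List.pySetD L (i : Int) q.2.2.2) (i : Int)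
        (PySem.Dict.ofList []) = q.2.2.2 := by
      rw [PySem.List.pyGetD_pySetD_natCast _ _ _ _ _ hiL]
      simp
    rw [hgetset]
    have hstepA : pvNucStepA alns distance (i : Int) pos_lst
        (num, iso, pre, PySem.List.pyGetD L (i : Int) (PySem.Dict.ofList [])) it
        = q := by
      rw [pvNucStepA_rows, hq]
    rw [hstepA]
    have heta : (q.1, q.2.1, q.2.2.1, q.2.2.2) = q := rfl
    rw [heta]
    have hsetset : ∀ v : PySem.Dict String Int,
        PySem.List.pySetD (PySem.List.pySetD L (i : Int) q.2.2.2) (i : Int) v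
        = PySem.List.pySetD L (i : Int) v := by
      intro v
      rw [PySem.List.pySetD_natCast, PySem.List.pySetD_natCast, PySem.List.pySetD_natCast,
        List.set_set]
    rw [hsetset]

-- main induction over the positions
theorem pvMainPos (alns : List (List String)) (freq_map : List (List (String × Int)))
    (distance : Int) :
    ∀ (cnt m : Nat), m + cnt = freq_map.length →
      ∀ (num : Int) (pre : List (List String)) (nfm : List (List (String × Int)))
        (iso : List (List String)) (L : List (PySem.Dict String Int)),
      L.length = freq_map.length →
      (∀ t : Nat, m ≤ t → t < freq_map.length →
        PySem.List.pyGetD L (t : Int) (PySem.Dict.ofList [])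
          = PySem.Dict.ofList (PySem.List.pyGetD freq_map (t : Int) [])) →
      ((PySem.List.pyRange (m : Int) (freq_map.length : Int) 1).foldl
          (pvPosStepA alns freq_map distance) (pre, nfm, iso, num)).1
        = ((PySem.List.pyRange (m : Int) (freq_map.length : Int) 1).foldl
            (fun s k => (pvEvPos alns distance (k, PySem.List.pyGetD freq_map k [])).foldl
              pvApplyEv s) (pre, L, iso)).1
      ∧ ((PySem.List.pyRange (m : Int) (freq_map.length : Int) 1).foldl
          (pvPosStepA alns freq_map distance) (pre, nfm, iso, num)).2.1
        = nfm ++ (((PySem.List.pyRange (m : Int) (freq_map.length : Int) 1).foldl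
            (fun s k => (pvEvPos alns distance (k, PySem.List.pyGetD freq_map k [])).foldl
              pvApplyEv s) (pre, L, iso)).2.1.drop m).map PySem.Dict.items
      ∧ ((PySem.List.pyRange (m : Int) (freq_map.length : Int) 1).foldl
          (pvPosStepA alns freq_map distance) (pre, nfm, iso, num)).2.2.1
        = ((PySem.List.pyRange (m : Int) (freq_map.length : Int) 1).foldl
            (fun s k => (pvEvPos alns distance (k, PySem.List.pyGetD freq_map k [])).foldl
              pvApplyEv s) (pre, L, iso)).2.2
      ∧ ((PySem.List.pyRange (m : Int) (freq_map.length : Int) 1).foldl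
            (fun s k => (pvEvPos alns distance (k, PySem.List.pyGetD freq_map k [])).foldl
              pvApplyEv s) (pre, L, iso)).2.1.length = freq_map.length
      ∧ ((PySem.List.pyRange (m : Int) (freq_map.length : Int) 1).foldl
            (fun s k => (pvEvPos alns distance (k, PySem.List.pyGetD freq_map k [])).foldl
              pvApplyEv s) (pre, L, iso)).2.1.take m = L.take m := by
  intro cnt
  induction cnt with
  | zero =>
    intro m hm num pre nfm iso L hlen hfm
    have hmK : m = freq_map.length := by omega
    subst hmK
    rw [PySem.List.pyRange_one_eq_nil le_rfl]
    simp only [List.foldl_nil]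
    refine ⟨trivial, ?_, trivial, hlen, trivial⟩
    rw [← hlen, List.drop_length]
    simp
  | succ c ih =>
    intro m hm num pre nfm iso L hlen hfm
    have hmK : (m : Int) < (freq_map.length : Int) := by omega
    have hmL : m < L.length := by omega
    rw [PySem.List.pyRange_one_cons hmK]
    simp only [List.foldl_cons]
    set d := PySem.Dict.ofList (PySem.List.pyGetD freq_map (m : Int) []) with hd
    set pos_lst := PySem.List.sorted d.items (fun x => -x.2) false with hpos
    set inner := (PySem.List.slice pos_lst (some 1) none).foldl
      (pvNucStepA alns distance (m : Int) pos_lst) (num, iso, pre, d) with hinner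
    have hA : pvPosStepA alns freq_map distance (pre, nfm, iso, num) (m : Int)
        = (inner.2.2.1, nfm ++ [inner.2.2.2.items], inner.2.1, inner.1) := rfl
    have hB : (pvEvPos alns distance ((m : Int),
          PySem.List.pyGetD freq_map (m : Int) [])).foldl pvApplyEv (pre, L, iso)
        = (inner.2.2.1, PySem.List.pySetD L (m : Int) inner.2.2.2, inner.2.1) := by
      show ((PySem.List.slice pos_lst (some 1) none).flatMap (fun it =>
          pvEvOne alns distance (m : Int) it.1
            (PySem.List.pyGetD pos_lst 0 ("", 0)).1)).foldl pvApplyEv (pre, L, iso) = _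
      rw [List.foldl_flatMap]
      have h := pvNucs_corr alns distance m pos_lst
        (PySem.List.slice pos_lst (some 1) none) num iso pre L hmL
      rw [hfm m le_rfl (by omega)] at h
      exact h
    rw [hA, hB]
    have hcast : (m : Int) + 1 = ((m + 1 : Nat) : Int) := by push_cast; ring
    rw [hcast]
    have hlen1 : (PySem.List.pySetD L (m : Int) inner.2.2.2).length = freq_map.length := by
      rw [PySem.List.pySetD_natCast]; simpa using hlen
    have hfm1 : ∀ t : Nat, m + 1 ≤ t → t < freq_map.length →
        PySem.List.pyGetD (PySem.List.pySetD L (m : Int) inner.2.2.2) (t : Int)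
          (PySem.Dict.ofList [])
        = PySem.Dict.ofList (PySem.List.pyGetD freq_map (t : Int) []) := by
      intro t ht1 ht2
      rw [PySem.List.pyGetD_pySetD_natCast _ _ _ _ _ hmL, if_neg (by omega)]
      exact hfm t (by omega) ht2
    obtain ⟨c1, c2, c3, c4, c5⟩ := ih (m + 1) (by omega) inner.1 inner.2.2.1
      (nfm ++ [inner.2.2.2.items]) inner.2.1
      (PySem.List.pySetD L (m : Int) inner.2.2.2) hlen1 hfm1
    refine ⟨c1, ?_, c3, c4, ?_⟩
    · rw [c2]
      set BF := (PySem.List.pyRange ((m + 1 : Nat) : Int) (freq_map.length : Int) 1).foldl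
        (fun s k => (pvEvPos alns distance (k, PySem.List.pyGetD freq_map k [])).foldl
          pvApplyEv s)
        (inner.2.2.1, PySem.List.pySetD L (m : Int) inner.2.2.2, inner.2.1) with hBF
      have hltB : m < BF.2.1.length := by rw [c4]; omega
      have hlt1 : m < (BF.2.1.take (m + 1)).length := by
        rw [List.length_take]; omega
      have hgm : BF.2.1[m]'hltB = inner.2.2.2 := by
        have h1 := congrArg (fun l : List (PySem.Dict String Int) => l[m]?) c5
        simp only [List.getElem?_take_of_lt (by omega : m < m + 1)] at h1
        rw [PySem.List.pySetD_natCast,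
          List.getElem?_set_self (by omega : m < L.length)] at h1
        rw [List.getElem_eq_iff hltB]
        exact h1
      rw [List.drop_eq_getElem_cons hltB, hgm]
      simp
    · have h := congrArg (List.take m) c5
      rw [List.take_take, List.take_take,
        show min m (m + 1) = m from by omega] at h
      rw [h, PySem.List.pySetD_natCast, List.take_set_of_le le_rfl]

theorem identify_isolates_spec : Claim_equal_identify_isolates := by
  intro item_id alns freq_map distance _ _
  unfold Spec_identify_isolates identify_isolates identify_isolates_alt
  simp only
  rw [List.foldl_flatMap, PySem.List.enumerate_eq_map_pyRange freq_map [],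
    PySem.List.len_eq, List.foldl_map]
  have hinit : alns.map (fun h => PySem.List.slice h none none) = alns := by
    simp [PySem.List.slice_none_none]
  rw [hinit]
  have hfm0 : ∀ t : Nat, 0 ≤ t → t < freq_map.length →
      PySem.List.pyGetD (freq_map.map PySem.Dict.ofList) (t : Int) (PySem.Dict.ofList [])
      = PySem.Dict.ofList (PySem.List.pyGetD freq_map (t : Int) []) := by
    intro t _ ht
    rw [PySem.List.pyGetD_natCast, PySem.List.pyGetD_natCast,
      List.getD_eq_getElem _ _ (by simpa using ht), List.getD_eq_getElem _ _ ht,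
      List.getElem_map]
  obtain ⟨c1, c2, c3, _, _⟩ := pvMainPos alns freq_map distance freq_map.length 0
    (by omega) 0 alns [] (List.replicate alns.length ([] : List String))
    (freq_map.map PySem.Dict.ofList) (by simp) hfm0
  simp only [Nat.cast_zero] at c1 c2 c3
  simp only [List.drop_zero, List.nil_append] at c2
  refine Prod.ext_iff.mpr ⟨c1, Prod.ext_iff.mpr ⟨?_, c3⟩⟩
  rw [c2]
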